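-- pv_equiv track=rewrite | github.com/kimdahee7/CodingTest_Python | 프로그래머스/1/133502. 햄버거 만들기/햄버거 만들기.py | solution
-- ===== SOURCE A (Python) =====
-- def solution(ingredient):
--     answer = 0
--     l = []
--     for i in ingredient:
--         l.append(i)
--         if len(l) >= 4 and l[len(l)-4:len(l)] == [1,2,3,1]:
--             answer +=1
--             l.pop()
--             l.pop()
--             l.pop()
--             l.pop()
--     return answer
-- ===== SOURCE B (Python) =====
-- def solution(ingredient):
--     lst = list(ingredient)
--     answer = 0
--     while True:
--         found = -1
--         for i in range(len(lst) - 3):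
--             if lst[i:i+4] == [1, 2, 3, 1]:
--                 found = i
--                 break
--         if found == -1:
--             return answer
--         del lst[found:found+4]
--         answer += 1
-- ===== Notes on version B (the rewrite author's own statement) =====
-- stated objective: alternative
-- what changed: A's single left-to-right pass with a stack is replaced by repeatedly scanning for the leftmost [1,2,3,1] factor and deleting it until none remains.
import Mathlib
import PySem

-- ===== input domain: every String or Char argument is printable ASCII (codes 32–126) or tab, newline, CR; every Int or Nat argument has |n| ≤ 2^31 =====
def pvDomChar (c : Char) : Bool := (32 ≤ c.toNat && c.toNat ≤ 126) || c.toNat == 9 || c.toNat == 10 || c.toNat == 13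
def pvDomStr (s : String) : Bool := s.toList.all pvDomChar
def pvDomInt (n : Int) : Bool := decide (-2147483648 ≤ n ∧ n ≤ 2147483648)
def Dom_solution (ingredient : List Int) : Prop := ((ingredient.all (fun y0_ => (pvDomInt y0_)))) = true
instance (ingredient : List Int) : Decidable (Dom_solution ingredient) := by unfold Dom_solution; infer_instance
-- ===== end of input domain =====

-- B replaces A's single stack pass by repeated leftmost-occurrence deletion (alternative algorithm, same result).

-- ===== PORT A =====
-- the for-loop over `ingredient` with state (answer, l); `l[len(l)-4:len(l)]` with
-- len(l) ≥ 4 guaranteed by the guard is exactly `drop (len-4)`; each `l.pop()` is `dropLast`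
def aLoop (answer : Int) (l : List Int) (rest : List Int) : Int :=
  match rest with
  | [] => answer
  | x :: rs =>
    let l2 := l ++ [x]
    if 4 ≤ l2.length ∧ l2.drop (l2.length - 4) = [1, 2, 3, 1] then
      aLoop (answer + 1) l2.dropLast.dropLast.dropLast.dropLast rs
    else
      aLoop answer l2 rs

def solution (ingredient : List Int) : Int := aLoop 0 [] ingredient

-- ===== PORT B =====
-- the inner `for i in range(len(lst)-3): if lst[i:i+4] == [1,2,3,1]` scan, as a
-- left-to-right recursion returning the first matching index
def findPat : List Int → Option Nat
  | a :: b :: c :: d :: rest =>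
    if a = 1 ∧ b = 2 ∧ c = 3 ∧ d = 1 then some 0
    else (findPat (b :: c :: d :: rest)).map (· + 1)
  | _ => none

-- needed by bLoop's termination argument
theorem findPat_some_le : ∀ {l : List Int} {i : Nat}, findPat l = some i → i + 4 ≤ l.length := by
  intro l
  induction l using findPat.induct with
  | case1 a b c d rest hpat =>
      intro i h
      simp [findPat, hpat] at h
      subst h; simp
  | case2 a b c d rest hpat ih =>
      intro i h
      simp only [findPat, if_neg hpat, Option.map_eq_some_iff] at h
      obtain ⟨j, hj, rfl⟩ := h
      have := ih hj
      simp at this ⊢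
      omega
  | case3 l h1 =>
      intro i h
      simp [findPat] at h


-- the outer `while True` loop of B with state (answer, lst); `del lst[found:found+4]`
-- is `take found ++ drop (found+4)`
def bLoop (answer : Int) (l : List Int) : Int :=
  match h : findPat l with
  | none => answer
  | some i => bLoop (answer + 1) (l.take i ++ l.drop (i + 4))
termination_by l.length
decreasing_by
  have := findPat_some_le h
  simp only [List.length_append, List.length_take, List.length_drop]
  omega

def solution_alt (ingredient : List Int) : Int := bLoop 0 ingredient

-- ===== PRECONDITION & SPEC =====
def Spec_solution (ingredient : List Int) (out : Int) : Prop := out = solution_alt ingredient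
instance (ingredient : List Int) (out : Int) : Decidable (Spec_solution ingredient out) := by unfold Spec_solution; infer_instance

-- ===== CLAIM (what is proved, stated in full; the proofs are below) =====
def Claim_equal_solution : Prop := ∀ (ingredient : List Int), Dom_solution ingredient → Spec_solution ingredient (solution ingredient)

-- ===== LEMMAS AND PROOFS =====

-- "the pattern [1,2,3,1] occurs in l at index i"
def OccPat (l : List Int) (i : Nat) : Prop := (l.drop i).take 4 = [1, 2, 3, 1]

theorem occ_len {l : List Int} {i : Nat} (h : OccPat l i) : i + 4 ≤ l.length := by
  have := congrArg List.length h
  simp at this ⊢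
  omega

theorem occ_zero {a b c d : Int} {rest : List Int} :
    OccPat (a :: b :: c :: d :: rest) 0 ↔ (a = 1 ∧ b = 2 ∧ c = 3 ∧ d = 1) := by
  simp [OccPat]

theorem occ_succ {a : Int} {tl : List Int} {j : Nat} :
    OccPat (a :: tl) (j + 1) ↔ OccPat tl j := by
  simp [OccPat]

theorem findPat_none_of : ∀ {l : List Int}, (∀ i, ¬ OccPat l i) → findPat l = none := by
  intro l
  induction l using findPat.induct with
  | case1 a b c d rest hpat =>
      intro h
      exact absurd (occ_zero.mpr hpat) (h 0)
  | case2 a b c d rest hpat ih =>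
      intro h
      have htl : ∀ i, ¬ OccPat (b :: c :: d :: rest) i := by
        intro i hi
        exact h (i + 1) (occ_succ.mpr hi)
      simp [findPat, if_neg hpat, ih htl]
  | case3 l h1 =>
      intro _
      simp [findPat]

theorem findPat_some_of : ∀ {l : List Int} {i : Nat}, OccPat l i → (∀ j < i, ¬ OccPat l j) →
    findPat l = some i := by
  intro l
  induction l using findPat.induct with
  | case1 a b c d rest hpat =>
      intro i hocc hmin
      match i with
      | 0 => simp [findPat, hpat]
      | i + 1 => exact absurd (occ_zero.mpr hpat) (hmin 0 (Nat.succ_pos i))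
  | case2 a b c d rest hpat ih =>
      intro i hocc hmin
      match i with
      | 0 => exact absurd (occ_zero.mp hocc) hpat
      | i + 1 =>
        have := ih (occ_succ.mp hocc) (fun j hj hoj => hmin (j + 1) (by omega) (occ_succ.mpr hoj))
        simp [findPat, if_neg hpat, this]
  | case3 l h1 =>
      intro i hocc hmin
      have hlen := occ_len hocc
      rcases l with _ | ⟨a, _ | ⟨b, _ | ⟨c, _ | ⟨d, r⟩⟩⟩⟩
      · simp at hlen
      · simp at hlen
      · simp at hlen
      · simp at hlen
      · exact absurd rfl (h1 a b c d r)

-- an occurrence strictly inside the left part of an append is an occurrence of the left part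
theorem occ_append_left {l r : List Int} {j : Nat} (hj : j + 4 ≤ l.length)
    (h : OccPat (l ++ r) j) : OccPat l j := by
  unfold OccPat at h ⊢
  rw [List.drop_append_of_le_length (by omega), List.take_append_of_le_length (by simp; omega)] at h
  exact h

theorem occ_of_occ_take {l : List Int} {k j : Nat} (h : OccPat (l.take k) j) : OccPat l j := by
  have hlen := occ_len h
  simp only [List.length_take] at hlen
  unfold OccPat at h ⊢
  rw [List.drop_take, List.take_take] at h
  rw [show min 4 (k - j) = 4 by omega] at h
  exact h

theorem bLoop_none {acc : Int} {l : List Int} (h : findPat l = none) : bLoop acc l = acc := by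
  rw [bLoop]
  split <;> simp_all

theorem bLoop_some {acc : Int} {l : List Int} {i : Nat} (h : findPat l = some i) :
    bLoop acc l = bLoop (acc + 1) (l.take i ++ l.drop (i + 4)) := by
  rw [bLoop]
  split <;> simp_all

theorem stack_eq : ∀ (rest l : List Int) (acc : Int), (∀ j, ¬ OccPat l j) →
    aLoop acc l rest = bLoop acc (l ++ rest) := by
  intro rest
  induction rest with
  | nil =>
      intro l acc h
      rw [List.append_nil, aLoop, bLoop_none (findPat_none_of h)]
  | cons x rs ih =>
      intro l acc h
      rw [aLoop]
      by_cases hc : 4 ≤ (l ++ [x]).length ∧ (l ++ [x]).drop ((l ++ [x]).length - 4) = [1, 2, 3, 1]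
      · rw [if_pos hc]
        obtain ⟨hlen, hdrop⟩ := hc
        simp only [List.length_append, List.length_cons, List.length_nil] at hlen hdrop
        have hn : 3 ≤ l.length := by omega
        -- decompose l ++ [x] = t ++ [1,2,3,1]
        rw [show l.length + (0 + 1) - 4 = l.length - 3 by omega] at hdrop
        have heq : l ++ [x] = l.take (l.length - 3) ++ [1, 2, 3, 1] := by
          have hsplit := List.take_append_drop (l.length - 3) (l ++ [x])
          rw [List.take_append_of_le_length (by omega), hdrop] at hsplit
          exact hsplit.symm
        set t := l.take (l.length - 3) with ht
        have htlen : t.length = l.length - 3 := by simp [ht]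
        have hnoT : ∀ j, ¬ OccPat t j := fun j hj => h j (occ_of_occ_take hj)
        have hfull : l ++ x :: rs = t ++ (1 :: 2 :: 3 :: 1 :: rs) := by
          have : l ++ x :: rs = (l ++ [x]) ++ rs := by simp
          rw [this, heq]
          simp
        have hfind : findPat (l ++ x :: rs) = some t.length := by
          apply findPat_some_of
          · unfold OccPat
            rw [hfull, List.drop_left]
            rfl
          · intro j hj hoj
            have : OccPat l j := occ_append_left (by omega) hoj
            exact h j this
        rw [bLoop_some hfind, hfull, List.take_left, List.drop_length_add_append,
            show List.drop 4 (1 :: 2 :: 3 :: 1 :: rs) = rs from rfl]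
        have hdl : (l ++ [x]).dropLast.dropLast.dropLast.dropLast = t := by
          rw [heq]; simp
        rw [hdl]
        exact ih t (acc + 1) hnoT
      · rw [if_neg hc]
        have hno : ∀ j, ¬ OccPat (l ++ [x]) j := by
          intro j hj
          have hlen := occ_len hj
          simp only [List.length_append, List.length_cons, List.length_nil] at hlen
          by_cases hjl : j + 4 ≤ l.length
          · exact h j (occ_append_left hjl hj)
          · apply hc
            have hj4 : j + 4 = l.length + 1 := by omega
            constructor
            · simp; omega
            · have hdl : ((l ++ [x]).drop j).length = 4 := by simp; omega
              have := hj
              unfold OccPat at this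
              rw [List.take_of_length_le (by omega)] at this
              rw [show (l ++ [x]).length - 4 = j by simp; omega]
              exact this
        have := ih (l ++ [x]) acc hno
        rw [this]
        congr 1
        simp

-- ===== VERDICT (by name: the statement is the Claim_ definition above) =====
theorem solution_spec : Claim_equal_solution := by
  intro ingredient _
  unfold Spec_solution solution solution_alt
  have h := stack_eq ingredient [] 0 (by intro j hj; have := occ_len hj; simp at this)
  simpa using h
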